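-- pv_equiv track=rewrite | github.com/DenisGazizov/algo | YP_6/62E_del_median.py | func
-- ===== SOURCE A (Python) =====
-- def func(n, array):
--     array.sort()
--     ans = n * [0]
--     i = 0
--     if n % 2 == 0:
--         left, right = n // 2 - 1, n // 2
--     else:
--         left = right = n // 2
--     while i < n:
--         if left == right:
--             ans[i] = array[left]
--             left -= 1
--             right += 1
--             i += 1
--         else:
--             ans[i] = array[left]
--             ans[i+1] = array[right]
--             left -= 1
--             right += 1
--             i += 2
--     return ans
-- ===== SOURCE B (Python) =====
-- def func(n, array):
--     # Same return value as A on 0 <= n <= len(array); sorts `array` in place like A.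
--     array.sort()
--     mid = n // 2
--     if n % 2 == 0:
--         ans = []
--         left, right = array[:mid], array[mid:n]
--     else:
--         ans = [array[mid]]
--         left, right = array[:mid], array[mid + 1:n]
--     for l, r in zip(reversed(left), right):
--         ans.append(l)
--         ans.append(r)
--     return ans
-- ===== Notes on version B (the rewrite author's own statement) =====
-- stated objective: simpler
-- what changed: Replaces the stateful while-loop that walks left/right index pointers with explicit index arithmetic and writes into a preallocated n*[0] buffer by slicing the sorted array into two median-split halves and interleaving them with zip(reversed(left), right), appending to the answer.
-- outside the precondition, e.g. on func(-1, [1, 2]): A returns [], B returns [2, 1, 1]; on func(3, [1]): A raises IndexError, B raises IndexError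
import Mathlib
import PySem

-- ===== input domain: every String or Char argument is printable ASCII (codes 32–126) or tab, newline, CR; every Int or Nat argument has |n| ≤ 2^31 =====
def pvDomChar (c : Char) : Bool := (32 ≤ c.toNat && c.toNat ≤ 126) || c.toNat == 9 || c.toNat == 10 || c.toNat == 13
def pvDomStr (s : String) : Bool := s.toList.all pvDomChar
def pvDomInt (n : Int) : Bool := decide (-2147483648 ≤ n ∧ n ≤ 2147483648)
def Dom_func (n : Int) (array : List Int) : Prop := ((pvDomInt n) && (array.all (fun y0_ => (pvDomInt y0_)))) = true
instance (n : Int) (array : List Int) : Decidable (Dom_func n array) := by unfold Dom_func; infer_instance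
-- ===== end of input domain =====

-- ===== PORT A =====
-- B rebuilds the interleave from two median-split slices of the sorted array with zip,
-- instead of A's pointer-walking while loop writing into a preallocated buffer.
-- Both Pythons sort `array` in place; the equivalence proved here is about the return value.

-- while i < n: … (state = ans, i, left, right; i strictly increases each iteration)
def funcLoop (n : Int) (s : List Int) (ans : List Int) (i left right : Int) : List Int :=
  if _h : i < n then
    if left == right then
      funcLoop n s (PySem.List.pySetD ans i (PySem.List.pyGetD s left 0)) (i + 1) (left - 1) (right + 1)
    else
      funcLoop n s
        (PySem.List.pySetD (PySem.List.pySetD ans i (PySem.List.pyGetD s left 0)) (i + 1)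
          (PySem.List.pyGetD s right 0))
        (i + 2) (left - 1) (right + 1)
  else ans
termination_by (n - i).toNat
decreasing_by all_goals omega

def func (n : Int) (array : List Int) : List Int :=
  let s := PySem.List.sorted array (fun x => x) false
  let ans := List.replicate n.toNat 0   -- n * [0]
  if PySem.Int.mod n 2 == 0 then
    funcLoop n s ans 0 (PySem.Int.floordiv n 2 - 1) (PySem.Int.floordiv n 2)
  else
    funcLoop n s ans 0 (PySem.Int.floordiv n 2) (PySem.Int.floordiv n 2)

-- ===== PORT B =====
def func_alt (n : Int) (array : List Int) : List Int :=
  let s := PySem.List.sorted array (fun x => x) false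
  let mid := PySem.Int.floordiv n 2
  let start :=
    if PySem.Int.mod n 2 == 0 then
      ([], PySem.List.slice s none (some mid), PySem.List.slice s (some mid) (some n))
    else
      ([PySem.List.pyGetD s mid 0], PySem.List.slice s none (some mid),
        PySem.List.slice s (some (mid + 1)) (some n))
  -- for l, r in zip(reversed(left), right): ans.append(l); ans.append(r)
  List.foldl (fun acc p => acc ++ [p.1, p.2]) start.1 (start.2.1.reverse.zip start.2.2)

-- ===== PRECONDITION & SPEC =====
-- Pre_ excludes n > len(array), where A raises IndexError, and negative n, outside the
-- function's count domain, where A ignores the array and returns [] while B's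
-- negative-index slicing/indexing yields other values (or raises).
def Pre_func (n : Int) (array : List Int) : Prop := 0 ≤ n ∧ n ≤ array.length
instance (n : Int) (array : List Int) : Decidable (Pre_func n array) := by
  unfold Pre_func; infer_instance
def pvWitness_func : Int × List Int := (4, [3, 1, 2, 5])
def Spec_func (n : Int) (array : List Int) (out : List Int) : Prop := out = func_alt n array
instance (n : Int) (array : List Int) (out : List Int) : Decidable (Spec_func n array out) := by
  unfold Spec_func; infer_instance

-- ===== CLAIM (what is proved, stated in full; the proofs are below) =====
def Claim_equal_func : Prop := ∀ (n : Int) (array : List Int), Dom_func n array → Pre_func n array → Spec_func n array (func n array)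

-- ===== LEMMAS AND PROOFS =====

-- the sequence s[l], s[r], s[l-1], s[r+1], … with k pairs
def genPairs (s : List Int) (l r : Int) : Nat → List Int
  | 0 => []
  | k + 1 => PySem.List.pyGetD s l 0 :: PySem.List.pyGetD s r 0 :: genPairs s (l - 1) (r + 1) k

theorem take_set_succ (xs : List Int) (j : Nat) (a : Int) (h : j < xs.length) :
    (xs.set j a).take (j + 1) = xs.take j ++ [a] := by
  induction xs generalizing j with
  | nil => simp at h
  | cons x xs ih =>
    cases j with
    | zero => simp
    | succ j => simp only [List.set_cons_succ, List.take_succ_cons, List.cons_append,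
        List.cons.injEq, true_and]; exact ih j (by simpa using h)

-- pair phase of A's loop: both pointers move outward, writing two cells per step
theorem funcLoop_pairs (s : List Int) (k : Nat) :
    ∀ (n i l r : Int) (ans : List Int),
    i = n - 2 * k → 0 ≤ i → ans.length = n.toNat → l < r → l + r = n - 1 →
    funcLoop n s ans i l r = ans.take i.toNat ++ genPairs s l r k := by
  induction k with
  | zero =>
    intro n i l r ans hi h0 hlen _ _
    unfold funcLoop
    have : ¬ i < n := by omega
    simp [this, genPairs, List.take_of_length_le,
      Nat.le_trans hlen.le (by omega : n.toNat ≤ i.toNat)]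
  | succ k ih =>
    intro n i l r ans hi h0 hlen hlr hsum
    unfold funcLoop
    have hin : i < n := by omega
    have hne : (l == r) = false := by simp; omega
    simp only [hin, reduceDIte, hne, Bool.false_eq_true, reduceIte]
    have hi1 : i + 1 < n := by omega
    have hit : i.toNat < ans.length := by omega
    rw [PySem.List.pySetD_of_nonneg _ _ h0,
        PySem.List.pySetD_of_nonneg _ _ (by omega : (0:Int) ≤ i + 1)]
    set a := PySem.List.pyGetD s l 0
    set b := PySem.List.pyGetD s r 0
    have hit1 : (i + 1).toNat = i.toNat + 1 := by omega
    rw [hit1]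
    have hlen' : (((ans.set i.toNat a).set (i.toNat + 1) b)).length = n.toNat := by
      simp [hlen]
    rw [ih n (i + 2) (l - 1) (r + 1) _ (by omega) (by omega) hlen' (by omega) (by omega)]
    have h2 : (i + 2).toNat = i.toNat + 2 := by omega
    rw [h2, genPairs]
    have hlt : i.toNat + 1 < (ans.set i.toNat a).length := by simp; omega
    have : ((ans.set i.toNat a).set (i.toNat + 1) b).take (i.toNat + 2) =
        (ans.set i.toNat a).take (i.toNat + 1) ++ [b] := take_set_succ _ _ _ hlt
    rw [this, take_set_succ _ _ _ hit]
    simp only [List.append_assoc, List.cons_append, List.nil_append]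
    rfl

-- the zip/append fold is the two-list interleave
def interleave2 : List Int → List Int → List Int
  | x :: xs, y :: ys => x :: y :: interleave2 xs ys
  | _, _ => []

theorem foldl_zip_interleave (L R : List Int) (acc : List Int) :
    List.foldl (fun acc p => acc ++ [p.1, p.2]) acc (L.zip R) = acc ++ interleave2 L R := by
  induction L generalizing R acc with
  | nil => simp [interleave2]
  | cons x L ih =>
    cases R with
    | nil => simp [interleave2]
    | cons y R => simp [List.zip_cons_cons, ih, interleave2]

-- interleaving the reversed lower half with the upper half yields A's outward walk
theorem interleave2_genPairs (s : List Int) (k : Nat) :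
    ∀ (r nn : Nat), r + k ≤ nn → nn ≤ s.length →
    interleave2 (s.take k).reverse ((s.take nn).drop r) =
      genPairs s ((k : Int) - 1) (r : Int) k := by
  induction k with
  | zero => intro r nn _ _; simp [interleave2, genPairs]
  | succ k ih =>
    intro r nn h1 h2
    have hk : k < s.length := by omega
    have hr : r < (s.take nn).length := by simp; omega
    rw [List.take_add_one, List.getElem?_eq_getElem hk]
    have hdrop : (s.take nn).drop r = (s.take nn)[r] :: (s.take nn).drop (r + 1) :=
      (List.drop_eq_getElem_cons hr)
    rw [hdrop]
    simp only [Option.toList_some, List.reverse_append, List.reverse_cons, List.reverse_nil,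
      List.nil_append, List.singleton_append, interleave2]
    rw [ih (r + 1) nn (by omega) h2, genPairs]
    have hg1 : PySem.List.pyGetD s ((k : Int)) 0 = s[k] := by
      simp [PySem.List.pyGetD_natCast, List.getD_eq_getElem?_getD, List.getElem?_eq_getElem hk]
    have hg2 : PySem.List.pyGetD s ((r : Nat) : Int) 0 = (s.take nn)[r] := by
      have hr' : r < s.length := by omega
      simp [PySem.List.pyGetD_natCast, List.getD_eq_getElem?_getD, List.getElem?_eq_getElem hr',
        List.getElem_take]
    have e1 : (((k + 1 : Nat)) : Int) - 1 = (k : Int) := by push_cast; ring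
    have e3 : (((r + 1 : Nat)) : Int) = (r : Int) + 1 := by push_cast; ring
    rw [e1, e3, hg1, hg2]

theorem length_sorted_int (xs : List Int) :
    (PySem.List.sorted xs (fun x : Int => x) false).length = xs.length :=
  PySem.List.length_sorted xs (fun x => x) false

-- ===== VERDICT (by name: the statement is the Claim_ definition above) =====
theorem func_spec : Claim_equal_func := by
  intro n array _ hpre
  obtain ⟨h0, hn⟩ := hpre
  unfold Spec_func func func_alt
  set s := PySem.List.sorted array (fun x => x) false with hs
  have hslen : s.length = array.length := length_sorted_int array
  have hnlen : n ≤ (s.length : Int) := by rw [hslen]; exact hn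
  simp only []
  by_cases hev : PySem.Int.mod n 2 == 0
  · -- even n: mid pairs, no centre element
    simp only [hev, if_true]
    have hmod : n % 2 = 0 := by
      have := of_decide_eq_true (by simpa using hev)
      simpa [PySem.Int.mod] using this
    set mid := PySem.Int.floordiv n 2 with hmid
    have hmidv : mid = n / 2 := by simp [hmid, PySem.Int.floordiv, Int.fdiv_eq_ediv]
    have h2m : 2 * mid = n := by omega
    have hm0 : 0 ≤ mid := by omega
    set k : Nat := mid.toNat with hk
    have hkm : (k : Int) = mid := by omega
    rw [funcLoop_pairs s k n 0 (mid - 1) mid _ (by omega) (by omega)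
      (by simp) (by omega) (by omega)]
    rw [PySem.List.slice_to _ hm0, PySem.List.slice_of_nonneg _ hm0 (by omega) (by omega) (by omega),
      foldl_zip_interleave]
    rw [show mid.toNat = k from rfl]
    have : (s.drop k).take (n.toNat - k) = (s.take n.toNat).drop k := by
      rw [List.drop_take]
    rw [this, interleave2_genPairs s k k n.toNat (by omega) (by omega)]
    simp [hkm]
  · -- odd n: centre element, then mid pairs
    simp only [hev, Bool.false_eq_true, if_false]
    have hmod : n % 2 = 1 := by
      have : ¬ PySem.Int.mod n 2 = 0 := by simpa using hev
      have h2 : PySem.Int.mod n 2 = n % 2 := by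
        simp [PySem.Int.mod, Int.fmod_eq_emod]
      omega
    set mid := PySem.Int.floordiv n 2 with hmid
    have hmidv : mid = n / 2 := by simp [hmid, PySem.Int.floordiv, Int.fdiv_eq_ediv]
    have h2m : 2 * mid + 1 = n := by omega
    have hm0 : 0 ≤ mid := by omega
    set k : Nat := mid.toNat with hk
    have hkm : (k : Int) = mid := by omega
    -- first iteration: left == right
    rw [funcLoop]
    have hin : (0 : Int) < n := by omega
    simp only [hin, reduceDIte, beq_self_eq_true, if_true, show (0:Int) + 1 = 1 from rfl]
    rw [PySem.List.pySetD_of_nonneg _ _ le_rfl]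
    rw [funcLoop_pairs s k n 1 (mid - 1) (mid + 1) _ (by omega) (by omega)
      (by simp) (by omega) (by omega)]
    rw [PySem.List.slice_to _ hm0, PySem.List.slice_of_nonneg _ (by omega) (by omega) (by omega) (by omega),
      foldl_zip_interleave]
    rw [show mid.toNat = k from rfl]
    have hd : (s.drop (mid + 1).toNat).take (n.toNat - (mid + 1).toNat) =
        (s.take n.toNat).drop (k + 1) := by
      rw [show (mid + 1).toNat = k + 1 by omega, List.drop_take]
    rw [hd]
    have := interleave2_genPairs s k (k + 1) n.toNat (by omega) (by omega)
    push_cast at this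
    rw [this]
    have hcent : ((List.replicate n.toNat 0).set (Int.toNat 0) (PySem.List.pyGetD s mid 0)).take
        (Int.toNat 1) = [PySem.List.pyGetD s mid 0] := by
      have : (0 : Int).toNat = 0 := rfl
      rw [this, show (1 : Int).toNat = 0 + 1 from rfl,
        take_set_succ _ _ _ (by simp; omega)]
      simp
    rw [hcent]
    simp [hkm]
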